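-- pv_equiv track=rewrite | github.com/socar-abel/Problem_Solving | 프로그래머스/Level2/땅따먹기.py | solution
-- ===== SOURCE A (Python) =====
-- def solution(land):
--     answer = 0
--     dp = [[0]*4 for _ in range(len(land))]
--     dp[0] = land[0]
--
--     for i in range(1,len(land)):
--         for x in range(4):
--             dp[i][x] = max(dp[i-1][:x]+dp[i-1][x+1:]) + land[i][x]
--
--     return max(dp[-1])
-- ===== SOURCE B (Python) =====
-- def solution(land):
--     prev = land[0]
--     for row in land[1:]:
--         idx1, max1, max2 = 0, prev[0], None
--         for j, v in enumerate(prev[1:], 1):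
--             if v > max1:
--                 idx1, max1, max2 = j, v, max1
--             elif max2 is None or v > max2:
--                 max2 = v
--         prev = [row[x] + (max2 if x == idx1 else max1) for x in range(4)]
--     return max(prev)
-- ===== Notes on version B (the rewrite author's own statement) =====
-- stated objective: alternative
-- what changed: Instead of rebuilding a length-3 slice and taking its max for every cell of a full dp table, B keeps a single rolling previous-row vector and scans it once per row for its max, argmax and second max (by multiplicity); each cell then adds max2 if it is the argmax column, else max1.
import Mathlib
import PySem

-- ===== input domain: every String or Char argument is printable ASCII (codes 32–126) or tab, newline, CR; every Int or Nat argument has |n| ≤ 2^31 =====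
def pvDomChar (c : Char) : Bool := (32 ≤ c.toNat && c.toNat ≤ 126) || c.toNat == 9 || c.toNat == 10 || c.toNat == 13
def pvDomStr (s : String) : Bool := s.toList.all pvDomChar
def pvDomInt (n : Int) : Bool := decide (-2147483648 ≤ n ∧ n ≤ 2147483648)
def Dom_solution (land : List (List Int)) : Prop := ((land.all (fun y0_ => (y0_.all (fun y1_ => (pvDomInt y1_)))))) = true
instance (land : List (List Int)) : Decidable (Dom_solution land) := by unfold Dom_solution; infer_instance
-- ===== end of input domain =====

-- B replaces the per-cell length-3 slice + max over the full dp table with a rolling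
-- previous-row vector scanned once per row for its (argmax, max, second max).

-- Python's max over a list (nonempty wherever the ported code reaches it; [] → 0 only off Pre_)
def pyMaxD (xs : List Int) : Int :=
  match xs with
  | [] => 0
  | h :: t => t.foldl max h

-- ===== PORT A =====
-- literal port of A: full dp table, dp[i][x] = max(dp[i-1][:x]+dp[i-1][x+1:]) + land[i][x]
def solution (land : List (List Int)) : Int :=
  let n := land.length
  let dp : List (List Int) := (List.range n).map (fun _ => [0, 0, 0, 0])
  let dp := dp.set 0 (land.getD 0 [])
  let dp := (List.range' 1 (n - 1)).foldl (fun dp i =>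
    (List.range 4).foldl (fun dp x =>
      let prev := dp.getD (i - 1) []
      dp.set i ((dp.getD i []).set x
        (pyMaxD (prev.take x ++ prev.drop (x + 1)) + ((land.getD i []).getD x 0)))) dp) dp
  pyMaxD (dp.getD (n - 1) [])

-- ===== PORT B =====
-- one step of B's inner top-2 scan (state: argmax index, max, second max)
def top2Step (s : Nat × Int × Option Int) (vj : Int × Nat) : Nat × Int × Option Int :=
  let (idx1, max1, max2) := s
  if vj.1 > max1 then (vj.2, vj.1, some max1)
  else match max2 with
    | none => (idx1, max1, some vj.1)
    | some m2 => if vj.1 > m2 then (idx1, max1, some vj.1) else s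

-- port of B: rolling prev vector; per row, one scan for (argmax, max, second max)
def solution_alt (land : List (List Int)) : Int :=
  match land with
  | [] => 0
  | r0 :: rest =>
    let last := rest.foldl (fun prev row =>
      let s := (prev.tail.zipIdx 1).foldl top2Step (0, prev.headD 0, (none : Option Int))
      (List.range 4).map (fun x =>
        row.getD x 0 + (if x = s.1 then s.2.2.getD 0 else s.2.1))) r0
    pyMaxD last

-- ===== PRECONDITION & SPEC =====
-- Pre_ is exactly where A returns: A raises (ValueError/IndexError) on [], on a lone empty
-- row, and on multi-row inputs whose first row has < 2 entries or a later row < 4 entries.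
def Pre_solution (land : List (List Int)) : Prop :=
  land ≠ [] ∧
    (if land.length = 1 then land.headD [] ≠ []
     else 2 ≤ (land.headD []).length ∧ ∀ q ∈ land.tail, 4 ≤ q.length)

instance (land : List (List Int)) : Decidable (Pre_solution land) := by
  unfold Pre_solution; infer_instance

def pvWitness_solution : List (List Int) := [[1, 2, 3, 5], [5, 6, 7, 8], [4, 3, 2, 1]]

def Spec_solution (land : List (List Int)) (out : Int) : Prop := out = solution_alt land
instance (land : List (List Int)) (out : Int) : Decidable (Spec_solution land out) := by
  unfold Spec_solution; infer_instance

-- ===== CLAIM (what is proved, stated in full; the proofs are below) =====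
def Claim_equal_solution : Prop :=
  ∀ (land : List (List Int)), Dom_solution land → Pre_solution land →
    Spec_solution land (solution land)

-- ===== LEMMAS AND PROOFS =====

-- the per-row recurrence both programs compute
def stepRow (prev row : List Int) : List Int :=
  (List.range 4).map (fun x => pyMaxD (prev.take x ++ prev.drop (x + 1)) + row.getD x 0)

theorem le_foldl_max (t : List Int) (h : Int) : h ≤ t.foldl max h := by
  induction t generalizing h with
  | nil => simp
  | cons a t ih => exact le_trans (le_max_left h a) (ih _)

theorem le_pyMaxD (h : Int) (t : List Int) : ∀ y ∈ h :: t, y ≤ pyMaxD (h :: t) := by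
  induction t generalizing h with
  | nil => intro y hy; simp at hy; simp [pyMaxD, hy]
  | cons a t ih =>
    intro y hy
    have hstep : pyMaxD (h :: a :: t) = pyMaxD (max h a :: t) := rfl
    rw [hstep]
    rcases List.mem_cons.1 hy with rfl | hy2
    · exact le_trans (le_max_left y a) (le_foldl_max t _)
    · rcases List.mem_cons.1 hy2 with rfl | h3
      · exact le_trans (le_max_right h y) (le_foldl_max t _)
      · exact ih (max h a) y (List.mem_cons_of_mem _ h3)

theorem pyMaxD_mem (h : Int) (t : List Int) : pyMaxD (h :: t) ∈ h :: t := by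
  induction t generalizing h with
  | nil => simp [pyMaxD]
  | cons a t ih =>
    have hstep : pyMaxD (h :: a :: t) = pyMaxD (max h a :: t) := rfl
    rw [hstep]
    have := ih (max h a)
    rcases List.mem_cons.1 this with heq | hmem
    · rw [heq]; rcases max_choice h a with hc | hc <;> rw [hc] <;> simp
    · exact List.mem_cons_of_mem _ (List.mem_cons_of_mem _ hmem)

theorem pyMaxD_eq {l : List Int} {m : Int} (hm : m ∈ l) (hub : ∀ y ∈ l, y ≤ m) :
    pyMaxD l = m := by
  cases l with
  | nil => simp at hm
  | cons h t =>
    exact le_antisymm (hub _ (pyMaxD_mem h t)) (le_pyMaxD h t m hm)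

theorem pyMaxD_append_singleton (l : List Int) (v : Int) (hl : l ≠ []) :
    pyMaxD (l ++ [v]) = max (pyMaxD l) v := by
  cases l with
  | nil => simp at hl
  | cons h t => simp [pyMaxD, List.foldl_append]

-- invariant of the top-2 scan over the processed prefix p
def Top2Inv (p : List Int) (s : Nat × Int × Option Int) : Prop :=
  s.1 < p.length ∧ p.getD s.1 0 = s.2.1 ∧ (∀ y ∈ p, y ≤ s.2.1) ∧
    s.2.2 = if p.length ≤ 1 then none
            else some (pyMaxD (p.take s.1 ++ p.drop (s.1 + 1)))

theorem getD_append_left (p q : List Int) (i : Nat) (hi : i < p.length) :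
    (p ++ q).getD i 0 = p.getD i 0 := by
  simp [List.getD, List.getElem?_append_left hi]

theorem mem_of_getD {p : List Int} {i : Nat} (hi : i < p.length) : p.getD i 0 ∈ p := by
  rw [List.getD_eq_getElem p 0 hi]; exact List.getElem_mem hi

theorem inv_step {p : List Int} {s : Nat × Int × Option Int} (h : Top2Inv p s) (v : Int) :
    Top2Inv (p ++ [v]) (top2Step s (v, p.length)) := by
  obtain ⟨i1, m1, m2⟩ := s
  obtain ⟨h1, h2, h3, h4⟩ := h
  simp only at h1 h2 h3 h4
  have hp : p ≠ [] := by intro hh; rw [hh] at h1; simp at h1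
  have hp1 : 1 ≤ p.length := List.length_pos_iff.2 hp
  have hm1mem : m1 ∈ p := h2 ▸ mem_of_getD h1
  by_cases hv : v > m1
  · -- new max
    simp only [top2Step, if_pos hv]
    refine ⟨by simp, by simp [List.getD], ?_, ?_⟩
    · show ∀ y ∈ p ++ [v], y ≤ v
      intro y hy
      rcases List.mem_append.1 hy with hy | hy
      · exact le_of_lt (lt_of_le_of_lt (h3 y hy) hv)
      · simp at hy; omega
    · have hlen : ¬ (p ++ [v]).length ≤ 1 := by simp; omega
      rw [if_neg hlen]
      have ht : (p ++ [v]).take p.length = p := by simp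
      have hd : (p ++ [v]).drop (p.length + 1) = [] := by
        apply List.drop_eq_nil_of_le; simp
      rw [ht, hd, List.append_nil]
      rw [pyMaxD_eq hm1mem h3]
  · simp only [top2Step, if_neg hv]
    cases m2 with
    | none =>
      dsimp only
      -- p has a single element
      have hlen1 : p.length ≤ 1 := by
        by_contra hc
        rw [if_neg hc] at h4; simp at h4
      have hlen : p.length = 1 := le_antisymm hlen1 hp1
      obtain ⟨a, rfl⟩ : ∃ a, p = [a] := by
        cases p with
        | nil => simp at hlen
        | cons a t => cases t with
          | nil => exact ⟨a, rfl⟩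
          | cons b t => simp at hlen
      have hi0 : i1 = 0 := by simp at h1; omega
      subst hi0
      simp only [List.getD] at h2
      simp at h2
      subst h2
      refine ⟨by simp, by simp [List.getD], ?_, ?_⟩
      · intro y hy
        simp at hy ⊢
        rcases hy with rfl | rfl
        · exact le_refl _
        · omega
      · simp [pyMaxD]
    | some m2v =>
      dsimp only
      have hlen2 : ¬ p.length ≤ 1 := by
        by_contra hc
        rw [if_pos hc] at h4; simp at h4
      have h4' : m2v = pyMaxD (p.take i1 ++ p.drop (i1 + 1)) := by
        rw [if_neg hlen2] at h4; exact Option.some.inj h4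
      have hrm : (p ++ [v]).take i1 ++ (p ++ [v]).drop (i1 + 1)
          = (p.take i1 ++ p.drop (i1 + 1)) ++ [v] := by
        rw [List.take_append_of_le_length (by omega), List.drop_append_of_le_length (by omega),
          List.append_assoc]
      have hne : p.take i1 ++ p.drop (i1 + 1) ≠ [] := by
        intro hc
        have := congrArg List.length hc
        simp only [List.length_append, List.length_take, List.length_drop,
          List.length_nil] at this
        omega
      have hmax : pyMaxD ((p ++ [v]).take i1 ++ (p ++ [v]).drop (i1 + 1))
          = max m2v v := by
        rw [hrm, pyMaxD_append_singleton _ _ hne, h4']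
      by_cases hv2 : v > m2v
      · simp only [if_pos hv2]
        refine ⟨?_, ?_, ?_, ?_⟩
        · show i1 < (p ++ [v]).length
          simp; omega
        · show (p ++ [v]).getD i1 0 = m1
          rw [getD_append_left p [v] i1 h1, h2]
        · show ∀ y ∈ p ++ [v], y ≤ m1
          intro y hy
          rcases List.mem_append.1 hy with hy | hy
          · exact h3 y hy
          · simp at hy; omega
        · show some v = _
          rw [if_neg (by simp [hp]), hmax]
          congr 1; omega
      · simp only [if_neg hv2]
        refine ⟨?_, ?_, ?_, ?_⟩
        · show i1 < (p ++ [v]).length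
          simp; omega
        · show (p ++ [v]).getD i1 0 = m1
          rw [getD_append_left p [v] i1 h1, h2]
        · show ∀ y ∈ p ++ [v], y ≤ m1
          intro y hy
          rcases List.mem_append.1 hy with hy | hy
          · exact h3 y hy
          · simp at hy; omega
        · show some m2v = _
          rw [if_neg (by simp [hp]), hmax]
          congr 1; omega

theorem inv_fold {t : List Int} : ∀ {p : List Int} {s : Nat × Int × Option Int},
    Top2Inv p s → Top2Inv (p ++ t) ((t.zipIdx p.length).foldl top2Step s) := by
  induction t with
  | nil => intro p s h; simpa using h
  | cons v t ih =>
    intro p s h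
    rw [List.zipIdx_cons, List.foldl_cons]
    have h2 := ih (inv_step h v)
    rw [List.length_append] at h2
    simpa [List.append_assoc] using h2

theorem remove_max {prev : List Int} {i1 : Nat} {m1 m2v : Int}
    (h : Top2Inv prev (i1, m1, some m2v)) (x : Nat) :
    pyMaxD (prev.take x ++ prev.drop (x + 1)) = if x = i1 then m2v else m1 := by
  obtain ⟨h1, h2, h3, h4⟩ := h
  simp only at h1 h2 h3 h4
  by_cases hx : x = i1
  · subst hx
    rw [if_pos rfl]
    by_cases hl : prev.length ≤ 1
    · rw [if_pos hl] at h4; simp at h4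
    · rw [if_neg hl] at h4
      exact (Option.some.inj h4).symm
  · rw [if_neg hx]
    apply pyMaxD_eq
    · -- m1 = prev[i1] survives the removal of position x
      rcases Nat.lt_or_ge i1 x with hlt | hge
      · apply List.mem_append.2; left
        have hi' : i1 < (prev.take x).length := by simp; omega
        have : (prev.take x)[i1] = prev[i1] := List.getElem_take
        rw [← h2, List.getD_eq_getElem prev 0 h1, ← this]
        exact List.getElem_mem hi'
      · have hgt : x + 1 ≤ i1 := by omega
        apply List.mem_append.2; right
        rw [← h2, List.getD_eq_getElem prev 0 h1]
        apply List.mem_iff_getElem?.2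
        refine ⟨i1 - (x + 1), ?_⟩
        have heq : (x + 1) + (i1 - (x + 1)) = i1 := by omega
        rw [List.getElem?_drop, heq, List.getElem?_eq_getElem h1]
    · intro y hy
      rcases List.mem_append.1 hy with hy | hy
      · exact h3 y (List.take_subset _ _ hy)
      · exact h3 y (List.drop_subset _ _ hy)

theorem stepB_eq_stepRow (prev row : List Int) (hl : 2 ≤ prev.length) :
    (List.range 4).map (fun x =>
        row.getD x 0 +
          (if x = ((prev.tail.zipIdx 1).foldl top2Step (0, prev.headD 0, none)).1
           then ((prev.tail.zipIdx 1).foldl top2Step (0, prev.headD 0, none)).2.2.getD 0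
           else ((prev.tail.zipIdx 1).foldl top2Step (0, prev.headD 0, none)).2.1)) =
      stepRow prev row := by
  cases prev with
  | nil => simp at hl
  | cons a tl =>
    have hinv0 : Top2Inv [a] (0, a, none) := by
      refine ⟨by simp, by simp [List.getD], by simp, by simp⟩
    have hinv := inv_fold (t := tl) hinv0
    simp only [List.length_cons, List.length_nil] at hinv
    have htl : ([a] ++ tl) = a :: tl := rfl
    rw [htl] at hinv
    set s := ((a :: tl).tail.zipIdx 1).foldl top2Step (0, (a :: tl).headD 0, none) with hs
    have hseq : s = (tl.zipIdx 1).foldl top2Step (0, a, none) := by simp [hs]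
    rw [← hseq] at hinv
    obtain ⟨s1, sm1, sm2⟩ := s
    have hlen2 : ¬ (a :: tl).length ≤ 1 := by
      simp only [List.length_cons] at hl ⊢; omega
    obtain ⟨h1, h2, h3, h4⟩ := hinv
    simp only at h1 h2 h3 h4
    rw [if_neg hlen2] at h4
    obtain ⟨m2v, rfl⟩ : ∃ m2v, sm2 = some m2v := ⟨_, h4⟩
    have hinv' : Top2Inv (a :: tl) (s1, sm1, some m2v) :=
      ⟨h1, h2, h3, by rw [if_neg hlen2]; exact h4⟩
    unfold stepRow
    apply List.map_congr_left
    intro x hx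
    rw [remove_max hinv' x]
    dsimp only
    by_cases hxe : x = s1
    · rw [if_pos hxe, if_pos hxe]
      simp [Int.add_comm]
    · rw [if_neg hxe, if_neg hxe]
      exact Int.add_comm _ _

theorem inner_loop (dp : List (List Int)) (land : List (List Int)) (i : Nat)
    (hi : i < dp.length) (h0 : dp.getD i [] = [0, 0, 0, 0]) (h1 : 1 ≤ i) :
    (List.range 4).foldl (fun dp x =>
        let prev := dp.getD (i - 1) []
        dp.set i ((dp.getD i []).set x
          (pyMaxD (prev.take x ++ prev.drop (x + 1)) + ((land.getD i []).getD x 0)))) dp =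
      dp.set i (stepRow (dp.getD (i - 1) []) (land.getD i [])) := by
  have hne : i - 1 ≠ i := by omega
  have hgd : ∀ (r : List Int), (dp.set i r).getD (i - 1) [] = dp.getD (i - 1) [] := by
    intro r
    simp [List.getD, List.getElem?_set]
    rw [if_neg (by omega : ¬ i = i - 1)]
  have hgi : ∀ (r : List Int), (dp.set i r).getD i [] = r := by
    intro r
    simp [List.getD, List.getElem?_set_eq_of_lt _ hi]
  show List.foldl _ _ _ = _
  rw [show List.range 4 = [0, 1, 2, 3] from rfl]
  simp only [List.foldl_cons, List.foldl_nil, hgd, hgi, List.set_set, h0]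
  rfl

theorem outer_loop (land : List (List Int)) :
    ∀ (k i : Nat) (dp : List (List Int)) (P : List Int), 1 ≤ i → i + k = land.length →
      dp.length = land.length → dp.getD (i - 1) [] = P →
      (∀ j, i ≤ j → j < land.length → dp.getD j [] = [0, 0, 0, 0]) →
      ((List.range' i k).foldl (fun dp i =>
          (List.range 4).foldl (fun dp x =>
            let prev := dp.getD (i - 1) []
            dp.set i ((dp.getD i []).set x
              (pyMaxD (prev.take x ++ prev.drop (x + 1)) + ((land.getD i []).getD x 0)))) dp)
        dp).getD (land.length - 1) [] = (land.drop i).foldl stepRow P := by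
  intro k
  induction k with
  | zero =>
    intro i dp P h1 hk hlen hP hz
    have hi : i = land.length := by omega
    have hdrop : land.drop i = [] := List.drop_eq_nil_of_le (by omega)
    simp only [List.range'_zero, List.foldl_nil, hdrop]
    rw [show land.length - 1 = i - 1 from by omega, hP]
  | succ k ih =>
    intro i dp P h1 hk hlen hP hz
    rw [List.range'_succ, List.foldl_cons]
    rw [inner_loop dp land i (by omega) (hz i (le_refl i) (by omega)) h1, hP]
    have hdp' := ih (i + 1) (dp.set i (stepRow P (land.getD i []))) (stepRow P (land.getD i []))
      (by omega) (by omega) (by simp [hlen])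
      (by
        have hi : i < (dp.set i (stepRow P (land.getD i []))).length := by simp; omega
        simp only [Nat.add_sub_cancel]
        simp [List.getD, List.getElem?_set_eq_of_lt _ (by simp [hlen]; omega : i < dp.length)])
      (by
        intro j hj1 hj2
        have : ¬ j = i := by omega
        simp only [List.getD, List.getElem?_set]
        rw [if_neg (by omega : ¬ i = j)]
        exact hz j (by omega) hj2)
    rw [hdp']
    have hdl : land.drop i = (land.getD i []) :: land.drop (i + 1) := by
      have hi : i < land.length := by omega
      rw [List.getD_eq_getElem land [] hi]
      exact List.drop_eq_getElem_cons hi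
    rw [hdl, List.foldl_cons]

theorem stepRow_length (p r : List Int) : (stepRow p r).length = 4 := by
  simp [stepRow]

theorem foldB_eq (rest : List (List Int)) : ∀ (prev : List Int), 2 ≤ prev.length →
    rest.foldl (fun prev row =>
      let s := (prev.tail.zipIdx 1).foldl top2Step (0, prev.headD 0, (none : Option Int))
      (List.range 4).map (fun x =>
        row.getD x 0 + (if x = s.1 then s.2.2.getD 0 else s.2.1))) prev =
    rest.foldl stepRow prev := by
  induction rest with
  | nil => intro prev h; rfl
  | cons row rest ih =>
    intro prev h
    rw [List.foldl_cons, List.foldl_cons]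
    rw [show (let s := (prev.tail.zipIdx 1).foldl top2Step (0, prev.headD 0, (none : Option Int))
      (List.range 4).map (fun x =>
        row.getD x 0 + (if x = s.1 then s.2.2.getD 0 else s.2.1))) = stepRow prev row from
      stepB_eq_stepRow prev row h]
    exact ih (stepRow prev row) (by simp [stepRow_length])

theorem solution_eq_fold (r0 : List Int) (rest : List (List Int)) :
    solution (r0 :: rest) = pyMaxD (rest.foldl stepRow r0) := by
  have hn : (r0 :: rest).length = rest.length + 1 := by simp
  have hlt : 0 < (List.range (r0 :: rest).length).length := by simp
  have hdp1len : (((List.range (r0 :: rest).length).map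
      (fun _ => ([0, 0, 0, 0] : List Int))).set 0 ((r0 :: rest).getD 0 [])).length
      = (r0 :: rest).length := by simp
  have hget0 : (((List.range (r0 :: rest).length).map
      (fun _ => ([0, 0, 0, 0] : List Int))).set 0 ((r0 :: rest).getD 0 [])).getD 0 [] = r0 := by
    simp [List.getD]
  have hzero : ∀ j, 1 ≤ j → j < (r0 :: rest).length →
      (((List.range (r0 :: rest).length).map
        (fun _ => ([0, 0, 0, 0] : List Int))).set 0 ((r0 :: rest).getD 0 [])).getD j []
        = [0, 0, 0, 0] := by
    intro j hj1 hj2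
    simp only [List.getD, List.getElem?_set]
    rw [if_neg (by omega : ¬ 0 = j)]
    have hj2' : j < rest.length + 1 := by simpa using hj2
    simp [hj2']
  have h := outer_loop (r0 :: rest) rest.length 1
    (((List.range (r0 :: rest).length).map
      (fun _ => ([0, 0, 0, 0] : List Int))).set 0 ((r0 :: rest).getD 0 []))
    r0 (le_refl 1) (by simp only [List.length_cons]; omega) hdp1len hget0 hzero
  exact congrArg pyMaxD h

-- ===== VERDICT (by name: the statement is the Claim_ definition above) =====
theorem solution_spec : Claim_equal_solution := by
  intro land hdom hpre
  unfold Spec_solution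
  obtain ⟨hne, hrest⟩ := hpre
  cases land with
  | nil => exact absurd rfl hne
  | cons r0 rest =>
    rw [solution_eq_fold]
    show pyMaxD (rest.foldl stepRow r0) = pyMaxD (rest.foldl _ r0)
    cases rest with
    | nil => rfl
    | cons q rest' =>
      have hlen : ¬ (r0 :: q :: rest').length = 1 := by simp
      rw [if_neg hlen] at hrest
      rw [foldB_eq (q :: rest') r0 (by simpa using hrest.1)]
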